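-- pv_equiv track=rewrite | github.com/Amyaa/CSCI561_HW3_Bayesian-Networks | bayes.py | getCPT
-- ===== SOURCE A (Python) =====
-- def getUnkown(test):
--     unkown = []
--     for i in range(len(test)):
--         if test[i] == 'U':
--             unkown.append(i)
--     return unkown
--
-- def getCPT(test):
--     result = []
--     unkown = getUnkown(test)
--     ulen = len(unkown)
--     import itertools
--     t = list(itertools.product(['F', 'T'], repeat = ulen))
--     for i in range(len(t)):
--         assign = t[i]
--         tmp = []
--         cnt = 0
--         for i in range(len(test)):
--             if i in unkown:
--                 tmp.append(assign[cnt])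
--                 cnt += 1
--             else:
--                 tmp.append(test[i])
--         result.append(tmp)
--     return result
--
-- result = ''
-- ===== SOURCE B (Python) =====
-- def getCPT(test):
--     # Right-to-left sweep: maintain the enumerated suffix rows (stored reversed),
--     # doubling them at each 'U'; no index lists, no membership tests, no counters.
--     rows = [[]]
--     for x in reversed(test):
--         if x == 'U':
--             rows = [r + [v] for v in ('F', 'T') for r in rows]
--         else:
--             for r in rows:
--                 r.append(x)
--     return [r[::-1] for r in rows]
-- ===== Notes on version B (the rewrite author's own statement) =====
-- stated objective: simpler
-- what changed: Replaced A's index machinery (collect unknown indices, itertools.product, rebuild each row with a full-length loop carrying a membership test and a counter) by a single right-to-left sweep that maintains the enumerated suffix rows, doubling them with 'F'/'T' at each 'U' and extending all rows at a known entry.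
import Mathlib
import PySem

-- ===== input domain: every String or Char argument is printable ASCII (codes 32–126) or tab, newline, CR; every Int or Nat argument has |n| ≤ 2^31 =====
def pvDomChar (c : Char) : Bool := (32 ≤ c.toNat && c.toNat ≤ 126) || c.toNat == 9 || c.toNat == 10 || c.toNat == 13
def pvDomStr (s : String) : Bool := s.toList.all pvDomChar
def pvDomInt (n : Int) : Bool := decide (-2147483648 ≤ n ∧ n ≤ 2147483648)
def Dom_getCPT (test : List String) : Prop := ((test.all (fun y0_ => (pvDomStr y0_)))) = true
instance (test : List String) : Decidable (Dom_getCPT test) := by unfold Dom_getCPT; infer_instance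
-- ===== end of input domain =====

-- B replaces A's index bookkeeping (unknown-index list, itertools.product, per-row rebuild
-- loop with membership test and counter) by a direct structural recursion on the list (simpler).

-- ===== PORT A =====
-- helper getUnkown: collect the indices whose entry is 'U' (test[i] is in range, so pyGetD is exact)
def getUnkown (test : List String) : List Int :=
  (PySem.List.pyRange 0 (PySem.List.len test) 1).foldl
    (fun unkown i => if PySem.List.pyGetD test i "" == "U" then unkown ++ [i] else unkown) []

-- port of itertools.product(['F','T'], repeat = n): first coordinate varies slowest
def prodFT : Nat → List (List String)
  | 0 => [[]]
  | n + 1 => ["F", "T"].flatMap (fun v => (prodFT n).map (fun a => v :: a))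

def getCPT (test : List String) : List (List String) :=
  let unkown := getUnkown test
  let ulen := unkown.length
  let t := prodFT ulen
  (PySem.List.pyRange 0 (PySem.List.len t) 1).foldl
    (fun result i =>
      let assign := PySem.List.pyGetD t i []
      let s := (PySem.List.pyRange 0 (PySem.List.len test) 1).foldl
        (fun (s : List String × Int) j =>
          if (getUnkown test).contains j then
            (s.1 ++ [PySem.List.pyGetD assign s.2 ""], s.2 + 1)
          else
            (s.1 ++ [PySem.List.pyGetD test j ""], s.2))
        ([], 0)
      result ++ [s.1]) []

-- ===== PORT B =====
def getCPT_alt (test : List String) : List (List String) :=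
  let rows := test.reverse.foldl
    (fun rows x =>
      if x == "U" then ["F", "T"].flatMap (fun v => rows.map (fun r => r ++ [v]))
      else rows.map (fun r => r ++ [x]))
    [[]]
  rows.map (fun r => r.reverse)

-- ===== PRECONDITION & SPEC =====
def Spec_getCPT (test : List String) (out : List (List String)) : Prop := out = getCPT_alt test
instance (test : List String) (out : List (List String)) : Decidable (Spec_getCPT test out) := by unfold Spec_getCPT; infer_instance

-- ===== CLAIM (what is proved, stated in full; the proofs are below) =====
def Claim_equal_getCPT : Prop := ∀ (test : List String), Dom_getCPT test → Spec_getCPT test (getCPT test)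

-- ===== LEMMAS AND PROOFS =====

-- number of 'U' entries
def cntU (l : List String) : Nat := l.countP (fun s => s == "U")

-- recursive substitution: the row A builds for a given assignment
def subst : List String → List String → List String
  | [], _ => []
  | x :: xs, a =>
    if x == "U" then PySem.List.pyGetD a 0 "" :: subst xs (a.drop 1) else x :: subst xs a

-- the rows of getCPT_alt, as a left-to-right structural recursion (proof helper)
def enumRows : List String → List (List String)
  | [] => [[]]
  | x :: xs =>
    let rest := enumRows xs
    if x == "U" then ["F", "T"].flatMap (fun v => rest.map (fun row => v :: row))
    else rest.map (fun row => x :: row)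

-- element j of the row A's inner loop builds
def frow (test assign : List String) (j : Nat) : String :=
  if test.getD j "" == "U" then PySem.List.pyGetD assign ((cntU (test.take j) : Nat) : Int) ""
  else test.getD j ""

lemma getUnkown_eq (test : List String) :
    getUnkown test =
      (PySem.List.pyRange 0 (PySem.List.len test) 1).filter
        (fun i => PySem.List.pyGetD test i "" == "U") := by
  unfold getUnkown
  simpa using PySem.List.foldl_append_if_eq_filter
    (l := PySem.List.pyRange 0 (PySem.List.len test) 1)
    (p := fun i => PySem.List.pyGetD test i "" == "U") (acc := [])

lemma contains_getUnkown (test : List String) (m : Nat) (hm : m < test.length) :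
    (getUnkown test).contains ((m : Nat) : Int) = (test.getD m "" == "U") := by
  rw [Bool.eq_iff_iff, List.contains_iff_mem, getUnkown_eq]
  simp [List.mem_filter, PySem.List.mem_pyRange_one, PySem.List.pyGetD_natCast]
  omega

lemma map_getD_range (l : List String) (d : String) :
    (List.range l.length).map (fun k => l.getD k d) = l := by
  apply List.ext_getElem (by simp)
  intro i h1 h2
  simp [List.getElem?_eq_getElem h2]

lemma length_getUnkown (test : List String) :
    (getUnkown test).length = cntU test := by
  rw [getUnkown_eq]
  simp only [PySem.List.len, PySem.List.pyRange_zero_natCast]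
  rw [List.filter_map, List.length_map, ← List.countP_eq_length_filter]
  have : cntU test = List.countP (fun s => s == "U")
      ((List.range test.length).map (fun k => test.getD k "")) := by
    rw [map_getD_range]; rfl
  rw [this, List.countP_map]
  congr 1
  funext k
  simp [PySem.List.pyGetD_natCast]

lemma inner_loop_eq (test assign : List String) (m : Nat) (hm : m ≤ test.length) :
    (PySem.List.pyRange 0 (m : Int) 1).foldl
        (fun (s : List String × Int) j =>
          if (getUnkown test).contains j then
            (s.1 ++ [PySem.List.pyGetD assign s.2 ""], s.2 + 1)
          else
            (s.1 ++ [PySem.List.pyGetD test j ""], s.2))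
        ([], 0)
      = ((List.range m).map (frow test assign), ((cntU (test.take m) : Nat) : Int)) := by
  induction m with
  | zero => simp [cntU]
  | succ m ih =>
    have hm' : m ≤ test.length := by omega
    have hlt : m < test.length := by omega
    rw [show ((m + 1 : Nat) : Int) = (m : Int) + 1 by push_cast; ring]
    rw [PySem.List.pyRange_one_succ_right (by positivity)]
    rw [List.foldl_append, ih hm', List.foldl_cons, List.foldl_nil]
    rw [contains_getUnkown test m hlt]
    have htake : test.take (m + 1) = test.take m ++ [test.getD m ""] := by
      rw [List.getD_eq_getElem test "" hlt, List.take_add_one]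
      simp [List.getElem?_eq_getElem hlt]
    by_cases h : (test.getD m "" == "U") = true
    · simp only [h, if_pos, Prod.mk.injEq]
      have h' : test[m]?.getD "" = "U" := by simpa [List.getD] using h
      constructor
      · rw [List.range_succ, List.map_append]
        simp [frow, List.getD, h']
      · rw [htake]
        simp only [cntU, List.countP_append, List.countP_cons, List.countP_nil, h]
        push_cast; ring
    · rw [if_neg (by simpa using h)]
      simp only [Prod.mk.injEq]
      have h' : ¬ test[m]?.getD "" = "U" := by simpa [List.getD] using h
      constructor
      · rw [List.range_succ, List.map_append]
        simp [frow, List.getD, h', PySem.List.pyGetD_natCast]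
      · rw [htake]
        simp only [cntU, List.countP_append, List.countP_cons, List.countP_nil, h]
        simp

lemma pyGetD_succ_drop (a : List String) (k : Nat) :
    PySem.List.pyGetD a ((k : Int) + 1) "" = PySem.List.pyGetD (a.drop 1) (k : Int) "" := by
  cases a with
  | nil => simp [PySem.List.pyGetD, PySem.List.pyGet?]
  | cons x a =>
    rw [show ((k : Int) + 1) = ((k + 1 : Nat) : Int) by push_cast; ring]
    rw [PySem.List.pyGetD_natCast, PySem.List.pyGetD_natCast]
    simp

lemma row_eq_subst (test assign : List String) :
    (List.range test.length).map (frow test assign) = subst test assign := by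
  induction test generalizing assign with
  | nil => simp [subst]
  | cons x xs ih =>
    show (List.range (xs.length + 1)).map (frow (x :: xs) assign) = subst (x :: xs) assign
    rw [List.range_succ_eq_map, List.map_cons, List.map_map]
    have h0 : frow (x :: xs) assign 0 =
        if x == "U" then PySem.List.pyGetD assign 0 "" else x := by
      simp [frow, cntU]
    by_cases hx : (x == "U") = true
    · have hcomp : (frow (x :: xs) assign) ∘ Nat.succ = frow xs (assign.drop 1) := by
        funext j
        simp only [Function.comp, frow, List.take_succ_cons, List.getD_cons_succ]
        by_cases hj : (xs.getD j "" == "U") = true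
        · rw [if_pos hj, if_pos hj]
          rw [show cntU (x :: xs.take j) = cntU (xs.take j) + 1 by
            simp [cntU, hx]]
          rw [show ((cntU (xs.take j) + 1 : Nat) : Int) = ((cntU (xs.take j) : Nat) : Int) + 1
            by push_cast; ring]
          exact pyGetD_succ_drop assign (cntU (xs.take j))
        · rw [if_neg hj, if_neg hj]
      rw [hcomp, ih, h0, if_pos hx]
      simp [subst, hx]
    · have hcomp : (frow (x :: xs) assign) ∘ Nat.succ = frow xs assign := by
        funext j
        simp only [Function.comp, frow, List.take_succ_cons, List.getD_cons_succ]
        rw [show cntU (x :: xs.take j) = cntU (xs.take j) by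
          simp [cntU, hx]]
      rw [hcomp, ih, h0, if_neg hx]
      simp [subst, hx]

lemma map_subst_prodFT (test : List String) :
    (prodFT (cntU test)).map (subst test) = enumRows test := by
  induction test with
  | nil => simp [prodFT, cntU, subst, enumRows]
  | cons x xs ih =>
    by_cases hx : (x == "U") = true
    · rw [show cntU (x :: xs) = cntU xs + 1 by simp [cntU, hx]]
      show (["F", "T"].flatMap fun v => (prodFT (cntU xs)).map (fun a => v :: a)).map
          (subst (x :: xs)) = _
      rw [List.map_flatMap]
      simp only [List.map_map]
      have hrow : ∀ v : String, (subst (x :: xs)) ∘ (fun a => v :: a) =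
          (fun row => v :: row) ∘ subst xs := by
        intro v
        funext a
        simp [subst, hx, PySem.List.pyGetD]
      simp only [hrow]
      simp only [enumRows, hx, if_pos]
      congr 1
      funext v
      rw [← List.map_map, ih]
    · rw [show cntU (x :: xs) = cntU xs by simp [cntU, hx]]
      rw [show enumRows (x :: xs) = (enumRows xs).map (fun row => x :: row) by
        simp [enumRows, hx]]
      rw [← ih, List.map_map]
      congr 1
      funext a
      simp [subst, hx]

lemma loop_eq (test : List String) :
    test.reverse.foldl
        (fun rows x =>
          if x == "U" then ["F", "T"].flatMap (fun v => rows.map (fun r => r ++ [v]))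
          else rows.map (fun r => r ++ [x]))
        [[]]
      = (enumRows test).map List.reverse := by
  induction test with
  | nil => simp [enumRows]
  | cons x xs ih =>
    rw [List.reverse_cons, List.foldl_append, ih, List.foldl_cons, List.foldl_nil]
    by_cases hx : (x == "U") = true
    · rw [if_pos hx]
      rw [show enumRows (x :: xs) = ["F", "T"].flatMap
          (fun v => (enumRows xs).map (fun row => v :: row)) by simp [enumRows, hx]]
      rw [List.map_flatMap]
      congr 1
      funext v
      simp [List.map_map, Function.comp]
    · rw [if_neg hx]
      rw [show enumRows (x :: xs) = (enumRows xs).map (fun row => x :: row) by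
        simp [enumRows, hx]]
      simp [List.map_map, Function.comp]

lemma alt_eq_enumRows (test : List String) : getCPT_alt test = enumRows test := by
  unfold getCPT_alt
  dsimp only
  rw [loop_eq, List.map_map]
  simp

-- ===== VERDICT (by name: the statement is the Claim_ definition above) =====
theorem getCPT_spec : Claim_equal_getCPT := by
  intro test _
  unfold Spec_getCPT getCPT
  dsimp only
  simp only [PySem.List.len_eq]
  rw [PySem.List.foldl_pyRange_zero_pyGetD' (prodFT (getUnkown test).length) []
    (fun acc assign =>
      acc ++ [((PySem.List.pyRange 0 ((test.length : Nat) : Int) 1).foldl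
        (fun (s : List String × Int) j =>
          if (getUnkown test).contains j then
            (s.1 ++ [PySem.List.pyGetD assign s.2 ""], s.2 + 1)
          else
            (s.1 ++ [PySem.List.pyGetD test j ""], s.2))
        ([], 0)).1]) []]
  rw [PySem.List.foldl_append_singleton_eq_map]
  simp only [List.nil_append]
  have hinner : ∀ assign : List String,
      ((PySem.List.pyRange 0 ((test.length : Nat) : Int) 1).foldl
        (fun (s : List String × Int) j =>
          if (getUnkown test).contains j then
            (s.1 ++ [PySem.List.pyGetD assign s.2 ""], s.2 + 1)
          else
            (s.1 ++ [PySem.List.pyGetD test j ""], s.2))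
        ([], 0)).1 = subst test assign := by
    intro assign
    rw [inner_loop_eq test assign test.length le_rfl]
    exact row_eq_subst test assign
  simp only [hinner, length_getUnkown]
  rw [alt_eq_enumRows]
  exact map_subst_prodFT test
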